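-- pv_equiv track=rewrite | github.com/pypi-data/pypi-mirror-340 | packages/ai-chat-html-exporter/ai_chat_html_exporter-1.0.2.post1.tar.gz/ai_chat_html_exporter-1.0.2.post1/ai_chat_html_exporter/html_generator.py | _detect_inline_code
-- ===== SOURCE A (Python) =====
-- def _detect_inline_code(text: str) -> str:
--     """检测内联代码"""
--     parts = text.split('`')
--     result = []
--     for i, part in enumerate(parts):
--         if i % 2 == 1:  # 奇数部分是代码
--             result.append(f'<code>{part}</code>')
--         else:
--             result.append(part)
--     return ''.join(result)
-- ===== SOURCE B (Python) =====
-- def _detect_inline_code(text: str) -> str: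
--     """Single linear scan toggling an in_code flag instead of split/enumerate/join."""
--     buf = []
--     in_code = False
--     for ch in text:
--         if ch == '`':
--             buf.append('</code>' if in_code else '<code>')
--             in_code = not in_code
--         else:
--             buf.append(ch)
--     if in_code:
--         buf.append('</code>')
--     return ''.join(buf)
-- ===== Notes on version B (the rewrite author's own statement) =====
-- stated objective: simpler
-- what changed: Replaced split-on-backtick + enumerate-parity wrapping + join by a single character scan that toggles an in_code flag, emitting <code>/</code> at each backtick and flushing a final </code> if the scan ends inside code.
import Mathlib
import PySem

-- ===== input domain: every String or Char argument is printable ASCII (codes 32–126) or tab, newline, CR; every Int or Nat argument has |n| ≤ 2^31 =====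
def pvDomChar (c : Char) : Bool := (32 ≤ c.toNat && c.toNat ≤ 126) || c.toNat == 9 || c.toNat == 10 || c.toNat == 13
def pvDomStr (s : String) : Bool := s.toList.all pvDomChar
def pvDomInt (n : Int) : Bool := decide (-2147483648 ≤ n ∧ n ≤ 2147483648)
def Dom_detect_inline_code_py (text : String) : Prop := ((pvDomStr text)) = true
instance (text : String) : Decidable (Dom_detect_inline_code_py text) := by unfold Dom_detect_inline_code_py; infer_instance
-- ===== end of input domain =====

-- B replaces A's split/enumerate-parity/join pipeline by one linear scan with an in_code flag; objective: simpler.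

-- ===== PORT A =====
-- parts = text.split('`'); wrap odd-indexed parts in <code>…</code>; ''.join
def detect_inline_code_py (text : String) : String :=
  String.mk (PySem.Chars.join []
    ((PySem.List.enumerate (PySem.Chars.splitOn text.toList ['`'])).foldl
      (fun acc p =>
        if p.1 % 2 == 1 then acc ++ ["<code>".toList ++ p.2 ++ "</code>".toList]
        else acc ++ [p.2]) []))

-- ===== PORT B =====
-- single scan: toggle in_code at each backtick, flush a closing tag at the end
def scanInline (inCode : Bool) : List Char → List Char
  | [] => if inCode then "</code>".toList else []
  | c :: cs =>
      if c == '`' then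
        (if inCode then "</code>".toList else "<code>".toList) ++ scanInline (!inCode) cs
      else c :: scanInline inCode cs

def detect_inline_code_py_alt (text : String) : String :=
  String.mk (scanInline false text.toList)

-- ===== PRECONDITION & SPEC =====
def Spec_detect_inline_code_py (text : String) (out : String) : Prop := out = detect_inline_code_py_alt text
instance (text : String) (out : String) : Decidable (Spec_detect_inline_code_py text out) := by unfold Spec_detect_inline_code_py; infer_instance

-- ===== CLAIM (what is proved, stated in full; the proofs are below) =====
def Claim_equal_detect_inline_code_py : Prop := ∀ (text : String), Dom_detect_inline_code_py text → Spec_detect_inline_code_py text (detect_inline_code_py text)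

-- ===== LEMMAS AND PROOFS =====

-- recursive characterisation of splitOn on the single-char separator '`'
def spBt : List Char → List (List Char)
  | [] => [[]]
  | c :: cs => if c = '`' then [] :: spBt cs else (spBt cs).modifyHead (c :: ·)

lemma spBt_ne_nil (cs : List Char) : spBt cs ≠ [] := by
  induction cs with
  | nil => simp [spBt]
  | cons c cs ih =>
    simp only [spBt]
    split_ifs
    · simp
    · cases h : spBt cs with
      | nil => exact absurd h ih
      | cons a t => simp

lemma splitOn_go_spec : ∀ (fuel : Nat) (cs cur : List Char) (acc : List (List Char)),
    cs.length < fuel →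
    PySem.Chars.splitOn.go ['`'] fuel cs cur acc
      = acc.reverse ++ (spBt cs).modifyHead (cur.reverse ++ ·) := by
  intro fuel
  induction fuel with
  | zero => intro cs cur acc h; omega
  | succ f ih =>
    intro cs cur acc h
    cases cs with
    | nil =>
      simp [PySem.Chars.splitOn.go, spBt]
    | cons c cs =>
      by_cases hc : c = '`'
      · subst hc
        rw [PySem.Chars.splitOn.go]
        have hp : List.isPrefixOf ['`'] ('`' :: cs) = true := by
          simp [List.isPrefixOf]
        rw [if_pos hp]
        rw [ih _ _ _ (by simpa using Nat.lt_of_succ_lt_succ h)]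
        simp only [spBt, if_pos rfl, List.reverse_nil, List.nil_append,
          List.modifyHead_cons, List.reverse_cons, List.append_assoc,
          List.singleton_append]
        cases h' : spBt cs <;> simp [h']
      · rw [PySem.Chars.splitOn.go]
        have hp : List.isPrefixOf ['`'] (c :: cs) = false := by
          simpa [List.isPrefixOf] using Ne.symm hc
        rw [if_neg (by simp [hp])]
        rw [ih _ _ _ (by simpa using Nat.lt_of_succ_lt_succ h)]
        simp only [spBt, if_neg hc]
        cases hsp : spBt cs with
        | nil => exact absurd hsp (spBt_ne_nil cs)
        | cons a t => simp

lemma splitOn_eq_spBt (cs : List Char) : PySem.Chars.splitOn cs ['`'] = spBt cs := by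
  rw [PySem.Chars.splitOn, splitOn_go_spec (cs.length + 1) cs [] [] (by omega)]
  cases h : spBt cs with
  | nil => exact absurd h (spBt_ne_nil cs)
  | cons a t => simp

-- what A's enumerate-parity wrapping produces, as a recursion on the part list
def wrapParts (odd : Bool) : List (List Char) → List Char
  | [] => []
  | p :: ps =>
      (if odd then "<code>".toList ++ p ++ "</code>".toList else p) ++ wrapParts (!odd) ps

lemma join_nil_eq_flatten (l : List (List Char)) : PySem.Chars.join [] l = l.flatten := by
  induction l with
  | nil => simp [PySem.Chars.join, List.intercalate]
  | cons a t ih =>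
    cases t with
    | nil => simp [PySem.Chars.join, List.intercalate]
    | cons b u =>
      simp only [PySem.Chars.join, List.intercalate, List.intersperse] at *
      simp_all

lemma foldlA_eq_wrapParts : ∀ (ps : List (List Char)) (n : Int) (acc : List (List Char)),
    0 ≤ n →
    PySem.Chars.join []
      ((PySem.List.enumerate ps n).foldl
        (fun acc p =>
          if p.1 % 2 == 1 then acc ++ ["<code>".toList ++ p.2 ++ "</code>".toList]
          else acc ++ [p.2]) acc)
      = PySem.Chars.join [] acc ++ wrapParts (n % 2 == 1) ps := by
  intro ps
  induction ps with
  | nil => intro n acc _; simp [PySem.List.enumerate, wrapParts]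
  | cons p ps ih =>
    intro n acc hn
    rw [PySem.List.enumerate]
    simp only [List.foldl_cons]
    rw [ih (n + 1) _ (by omega)]
    have hpar : ((n + 1) % 2 == 1) = !(n % 2 == 1) := by
      rcases Int.emod_two_eq_zero_or_one n with h | h <;> simp [h] <;> omega
    by_cases h1 : n % 2 = 1
    · simp only [h1, beq_self_eq_true, if_pos, hpar, wrapParts,
        join_nil_eq_flatten, List.flatten_append]
      simp [h1]
    · have hb : (n % 2 == 1) = false := by simpa using h1
      simp only [hb, Bool.false_eq_true, if_neg, hpar, wrapParts,
        join_nil_eq_flatten, List.flatten_append]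
      simp [hb]

-- core equivalence: the scanner equals parity wrapping of the backtick split
lemma scan_eq_wrap : ∀ (cs : List Char),
    scanInline false cs = wrapParts false (spBt cs) ∧
    "<code>".toList ++ scanInline true cs = wrapParts true (spBt cs) := by
  intro cs
  induction cs with
  | nil => constructor <;> simp [scanInline, spBt, wrapParts]
  | cons c cs ih =>
    obtain ⟨ih0, ih1⟩ := ih
    by_cases hc : c = '`'
    · subst hc
      refine ⟨?_, ?_⟩
      · have e : scanInline false ('`' :: cs) = "<code>".toList ++ scanInline true cs := by
          simp [scanInline]
        rw [e, ih1]
        simp [spBt, wrapParts]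
      · have e : scanInline true ('`' :: cs) = "</code>".toList ++ scanInline false cs := by
          simp [scanInline]
        rw [e, ih0]
        simp [spBt, wrapParts]
    · have hcb : (c == '`') = false := by simp [hc]
      obtain ⟨a, t, hsp⟩ : ∃ a t, spBt cs = a :: t := by
        cases h : spBt cs with
        | nil => exact absurd h (spBt_ne_nil cs)
        | cons a t => exact ⟨a, t, rfl⟩
      have hsp' : spBt (c :: cs) = (c :: a) :: t := by simp [spBt, hc, hsp]
      rw [hsp] at ih0 ih1
      have e0 : scanInline false (c :: cs) = c :: scanInline false cs := by
        simp [scanInline, hcb]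
      have e1 : scanInline true (c :: cs) = c :: scanInline true cs := by
        simp [scanInline, hcb]
      have htail : scanInline true cs = a ++ ("</code>".toList ++ wrapParts false t) :=
        List.append_cancel_left (as := "<code>".toList) (by rw [ih1]; simp [wrapParts])
      refine ⟨?_, ?_⟩
      · rw [e0, ih0, hsp']
        simp [wrapParts]
      · rw [e1, htail, hsp']
        simp [wrapParts]

-- ===== VERDICT (by name: the statement is the Claim_ definition above) =====
theorem detect_inline_code_py_spec : Claim_equal_detect_inline_code_py := by
  intro text _
  unfold Spec_detect_inline_code_py detect_inline_code_py detect_inline_code_py_alt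
  rw [splitOn_eq_spBt, foldlA_eq_wrapParts _ 0 [] (by omega), (scan_eq_wrap text.toList).1]
  simp [PySem.Chars.join, List.intercalate]
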